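-- pv_equiv track=rewrite | github.com/kik3078/Algorithm-Puzzle | pascal_q5.py | check
-- ===== SOURCE A (Python) =====
-- def paskal(n):
--     arr = [0] * (n + 1)
--     arr[0] = 1
--     for i in range(0, n):
--         for j in range(i+1, 0, -1):
--             arr[j] = arr[j-1] + arr[j]
--     return arr
--
-- def check(n):
--     arr = paskal(n)
--     cnt = 2
--     checker = [1, 5, 10, 50, 100, 500, 1000, 2000, 5000, 10000]
--     for i in range(1, len(arr) - 1):
--         for j in range(len(checker) - 1, -1, -1):
--             result, arr[i] = divmod(arr[i], checker[j])
--             cnt += result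
--     return cnt
-- ===== SOURCE B (Python) =====
-- COINS = [10000, 5000, 2000, 1000, 500, 100, 50, 10, 5, 1]
--
-- def coin_count(x):
--     total = 0
--     for coin in COINS:
--         total += x // coin
--         x %= coin
--     return total
--
-- def check(n):
--     cnt = 2
--     c = 1
--     for k in range(1, n):
--         c = c * (n - k + 1) // k
--         cnt += coin_count(c)
--     return cnt
-- ===== Notes on version B (the rewrite author's own statement) =====
-- stated objective: faster
-- what changed: B replaces A's O(n^2) in-place Pascal-triangle construction (and per-cell destructive divmod loop over the row list) by the O(n)-multiplication binomial recurrence C(n,k)=C(n,k-1)*(n-k+1)//k, feeding each coefficient to a standalone greedy coin-count helper in a single pass.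
import Mathlib
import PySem

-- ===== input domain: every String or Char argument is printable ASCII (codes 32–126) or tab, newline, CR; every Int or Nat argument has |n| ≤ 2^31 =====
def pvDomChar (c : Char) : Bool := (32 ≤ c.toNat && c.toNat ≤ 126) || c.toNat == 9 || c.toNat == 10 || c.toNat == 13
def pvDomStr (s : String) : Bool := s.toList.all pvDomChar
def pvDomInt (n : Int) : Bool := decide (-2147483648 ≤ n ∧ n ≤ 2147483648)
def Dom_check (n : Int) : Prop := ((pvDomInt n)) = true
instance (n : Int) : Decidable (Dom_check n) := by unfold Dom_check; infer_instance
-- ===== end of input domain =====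

-- B replaces A's O(n^2) in-place Pascal-triangle construction by the O(n) multiplicative
-- binomial recurrence C(n,k) = C(n,k-1)*(n-k+1)//k, summing greedy coin counts in one pass (faster).


-- ===== PORT A =====
-- Python's list is a mutable array: the port keeps it as Array Int (O(1) in-place update).
-- All indices A uses are nonnegative and in range (under Pre_), where these two helpers are
-- exactly Python's arr[i] read / write.
def pvAGet (a : Array Int) (i : Int) : Int := a.getD i.toNat 0

def pvASet (a : Array Int) (i : Int) (v : Int) : Array Int := a.setIfInBounds i.toNat v

-- inner 'for j' body of paskal: arr[j] = arr[j-1] + arr[j]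
def pvPaskalUpd (arr : Array Int) (j : Int) : Array Int :=
  pvASet arr j (pvAGet arr (j-1) + pvAGet arr j)

def paskal (n : Int) : List Int :=
  ((PySem.List.pyRange 0 n 1).foldl
      (fun arr i => (PySem.List.pyRange (i + 1) 0 (-1)).foldl pvPaskalUpd arr)
      (pvASet (Array.replicate (n + 1).toNat (0 : Int)) 0 1)).toList
      -- arr = [0] * (n + 1); arr[0] = 1 (IndexError for n < 0: outside Pre_)

def pvChecker : List Int := [1, 5, 10, 50, 100, 500, 1000, 2000, 5000, 10000]

-- 'result, arr[i] = divmod(arr[i], checker[j]); cnt += result'; every checker[j] is a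
-- nonzero literal, so floordiv/mod are exactly Python's divmod here
def pvCheckStep (st : Array Int × Int) (i j : Int) : Array Int × Int :=
  let x := pvAGet st.1 i
  let c := PySem.List.pyGetD pvChecker j 0
  (pvASet st.1 i (PySem.Int.mod x c), st.2 + PySem.Int.floordiv x c)

def check (n : Int) : Int :=
  let arr := (paskal n).toArray
  let st :=
    (PySem.List.pyRange 1 ((arr.size : Int) - 1) 1).foldl
      (fun st i =>
        (PySem.List.pyRange ((pvChecker.length : Int) - 1) (-1) (-1)).foldl
          (fun st j => pvCheckStep st i j) st)
      (arr, 2)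
  st.2

-- ===== PORT B =====
def pvCoins : List Int := [10000, 5000, 2000, 1000, 500, 100, 50, 10, 5, 1]

-- greedy coin count: total += x // coin; x %= coin
def coin_count (x : Int) : Int :=
  (pvCoins.foldl
      (fun (st : Int × Int) coin =>
        (PySem.Int.mod st.1 coin, st.2 + PySem.Int.floordiv st.1 coin))
      (x, 0)).2

def check_alt (n : Int) : Int :=
  ((PySem.List.pyRange 1 n 1).foldl
      (fun (st : Int × Int) k =>
        let c := PySem.Int.floordiv (st.1 * (n - k + 1)) k
        (c, st.2 + coin_count c))
      (1, 2)).2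

-- ===== PRECONDITION & SPEC =====
-- Pre_ excludes exactly n < 0, where A raises IndexError (arr[0] = 1 on an empty list).
def Pre_check (n : Int) : Prop := 0 ≤ n
instance (n : Int) : Decidable (Pre_check n) := by unfold Pre_check; infer_instance
def pvWitness_check : Int := 5

def Spec_check (n : Int) (out : Int) : Prop := out = check_alt n
instance (n : Int) (out : Int) : Decidable (Spec_check n out) := by unfold Spec_check; infer_instance

-- ===== CLAIM (what is proved, stated in full; the proofs are below) =====
def Claim_equal_check : Prop := ∀ (n : Int), Dom_check n → Pre_check n → Spec_check n (check n)

-- ===== LEMMAS AND PROOFS =====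

-- list-level mirror of port A (same algorithm over List Int), used only by the proofs
def pvPaskalUpdL (arr : List Int) (j : Int) : List Int :=
  PySem.List.pySetD arr j (PySem.List.pyGetD arr (j-1) 0 + PySem.List.pyGetD arr j 0)

def pvCheckStepL (st : List Int × Int) (i j : Int) : List Int × Int :=
  let x := PySem.List.pyGetD st.1 i 0
  let c := PySem.List.pyGetD pvChecker j 0
  (PySem.List.pySetD st.1 i (PySem.Int.mod x c), st.2 + PySem.Int.floordiv x c)

lemma pvAGet_toList (a : Array Int) (i : Int) (hi : 0 ≤ i) :
    pvAGet a i = PySem.List.pyGetD a.toList i 0 := by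
  rw [pvAGet, PySem.List.pyGetD_of_nonneg _ _ hi, Array.getD_eq_getD_getElem?,
    List.getD_eq_getElem?_getD, ← Array.getElem?_toList]

lemma pvASet_toList (a : Array Int) (i : Int) (v : Int) (hi : 0 ≤ i) :
    (pvASet a i v).toList = PySem.List.pySetD a.toList i v := by
  rw [pvASet, PySem.List.pySetD_of_nonneg _ _ hi]
  simp [Array.setIfInBounds]
  split_ifs with h
  · simp
  · rw [List.set_eq_of_length_le (by simpa using (by omega : a.size ≤ i.toNat))]

lemma pvPaskalUpd_toList (a : Array Int) (j : Int) (hj : 0 < j) :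
    (pvPaskalUpd a j).toList = pvPaskalUpdL a.toList j := by
  rw [pvPaskalUpd, pvPaskalUpdL, pvASet_toList _ _ _ (by omega),
    pvAGet_toList _ _ (by omega), pvAGet_toList _ _ (by omega)]

lemma pvCheckStep_toList (st : Array Int × Int) (i j : Int) (hi : 0 ≤ i) :
    ((pvCheckStep st i j).1.toList, (pvCheckStep st i j).2)
      = pvCheckStepL (st.1.toList, st.2) i j := by
  rw [pvCheckStep, pvCheckStepL]
  simp only []
  rw [pvASet_toList _ _ _ hi, pvAGet_toList _ _ hi]

lemma pvPaskalInner_bridge (rng : List Int) (h : ∀ x ∈ rng, 0 < x) (a : Array Int) :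
    (rng.foldl pvPaskalUpd a).toList = rng.foldl pvPaskalUpdL a.toList := by
  induction rng generalizing a with
  | nil => rfl
  | cons x rng ih =>
    rw [List.foldl_cons, List.foldl_cons, ih (fun y hy => h y (by simp [hy])),
      pvPaskalUpd_toList _ _ (h x (by simp))]

lemma pvPaskalOuter_bridge (rng : List Int) (a : Array Int) :
    ((rng.foldl (fun arr i => (PySem.List.pyRange (i + 1) 0 (-1)).foldl pvPaskalUpd arr) a)).toList
      = rng.foldl (fun arr i => (PySem.List.pyRange (i + 1) 0 (-1)).foldl pvPaskalUpdL arr) a.toList := by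
  induction rng generalizing a with
  | nil => rfl
  | cons x rng ih =>
    rw [List.foldl_cons, List.foldl_cons, ih,
      pvPaskalInner_bridge _ (fun y hy => ((PySem.List.mem_pyRange_neg_one).mp hy).1)]

lemma pvCheckInner_bridge (rng : List Int) (i : Int) (hi : 0 ≤ i) (st : Array Int × Int) :
    ((rng.foldl (fun st j => pvCheckStep st i j) st).1.toList,
     (rng.foldl (fun st j => pvCheckStep st i j) st).2)
      = rng.foldl (fun st j => pvCheckStepL st i j) (st.1.toList, st.2) := by
  induction rng generalizing st with
  | nil => rfl
  | cons x rng ih =>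
    rw [List.foldl_cons, List.foldl_cons, ih, pvCheckStep_toList _ _ _ hi]


-- remainder chain and greedy digit sum of x over a coin list
def pvModChain (x : Int) (cs : List Int) : Int := cs.foldl PySem.Int.mod x

def pvCoinAdd : Int → List Int → Int
  | _, [] => 0
  | x, c :: cs => PySem.Int.floordiv x c + pvCoinAdd (PySem.Int.mod x c) cs

lemma pvCoinFold (cs : List Int) (x t : Int) :
    cs.foldl (fun (st : Int × Int) c =>
        (PySem.Int.mod st.1 c, st.2 + PySem.Int.floordiv st.1 c)) (x, t)
      = (pvModChain x cs, t + pvCoinAdd x cs) := by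
  induction cs generalizing x t with
  | nil => simp [pvModChain, pvCoinAdd]
  | cons c cs ih => simp [pvModChain, pvCoinAdd, ih, add_assoc]

lemma coin_count_eq (x : Int) : coin_count x = pvCoinAdd x pvCoins := by
  simp [coin_count, pvCoinFold]

-- A's inner j-loop over checker indices 9..0 is the fold over the coin values pvCoins
def pvStepA (st : List Int × Int) (i : Int) : List Int × Int :=
  (PySem.List.pyRange ((pvChecker.length : Int) - 1) (-1) (-1)).foldl
    (fun st j => pvCheckStepL st i j) st

lemma pvStepA_coins (st : List Int × Int) (i : Int) :
    pvStepA st i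
      = pvCoins.foldl
          (fun st c =>
            (PySem.List.pySetD st.1 i (PySem.Int.mod (PySem.List.pyGetD st.1 i 0) c),
             st.2 + PySem.Int.floordiv (PySem.List.pyGetD st.1 i 0) c)) st := by
  rfl

lemma pvStepA_point (cs : List Int) (arr : List Int) (cnt : Int) (i : Nat) (hi : i < arr.length) :
    cs.foldl
        (fun (st : List Int × Int) c =>
          (st.1.set i (PySem.Int.mod (st.1.getD i 0) c),
           st.2 + PySem.Int.floordiv (st.1.getD i 0) c)) (arr, cnt)
      = (arr.set i (pvModChain (arr.getD i 0) cs),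
         cnt + pvCoinAdd (arr.getD i 0) cs) := by
  induction cs generalizing arr cnt with
  | nil =>
    simp [pvModChain, pvCoinAdd, List.getD_eq_getElem?_getD, hi]
  | cons c cs ih =>
    rw [List.foldl_cons, ih _ _ (by simpa using hi)]
    simp [pvModChain, pvCoinAdd, List.getD_eq_getElem?_getD, hi,
      List.set_set, add_assoc]

-- the row of binomial coefficients, padded (Nat.choose i k = 0 for k > i)
def pvRow (i m : Nat) : List Int := (List.range (m + 1)).map (fun k => ((i.choose k : Nat) : Int))

lemma pvRow_length (i m : Nat) : (pvRow i m).length = m + 1 := by simp [pvRow]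

lemma pvRow_getD (i m t : Nat) (ht : t < m + 1) : (pvRow i m).getD t 0 = (i.choose t : Int) := by
  simpa [pvRow] using PySem.List.getD_map_range (fun k => ((i.choose k : Nat) : Int)) (m+1) t 0 ht

lemma pvPaskalUpdL_nat (arr : List Int) (j : Nat) :
    pvPaskalUpdL arr ((j : Int) + 1) = arr.set (j+1) (arr.getD j 0 + arr.getD (j+1) 0) := by
  have h2 : ((j : Int) + 1) = (((j+1 : Nat)) : Int) := by push_cast; ring
  unfold pvPaskalUpdL
  rw [h2]
  have h3 : (((j+1 : Nat)) : Int) - 1 = ((j : Nat) : Int) := by push_cast; ring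
  rw [h3, PySem.List.pySetD_natCast, PySem.List.pyGetD_natCast, PySem.List.pyGetD_natCast]

-- the descending inner loop of paskal, pointwise
lemma pvPascFold (mN : Nat) (arr : List Int) :
    ((PySem.List.pyRange (mN : Int) 0 (-1)).foldl pvPaskalUpdL arr).length = arr.length ∧
    (mN < arr.length → ∀ t : Nat,
      ((PySem.List.pyRange (mN : Int) 0 (-1)).foldl pvPaskalUpdL arr).getD t 0
        = if 1 ≤ t ∧ t ≤ mN then arr.getD (t-1) 0 + arr.getD t 0 else arr.getD t 0) := by
  induction mN generalizing arr with
  | zero =>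
    rw [show ((0 : Nat) : Int) = 0 by rfl, PySem.List.pyRange_neg_one_eq_nil (by omega)]
    exact ⟨rfl, fun _ t => by rw [if_neg (by omega)]; rfl⟩
  | succ mN ih =>
    have hc : (((mN+1 : Nat)) : Int) = ((mN : Nat) : Int) + 1 := by push_cast; ring
    rw [hc, PySem.List.pyRange_neg_one_cons (by omega), List.foldl_cons, add_sub_cancel_right,
      pvPaskalUpdL_nat]
    set arr1 := arr.set (mN+1) (arr.getD mN 0 + arr.getD (mN+1) 0) with harr1def
    have hlen1 : arr1.length = arr.length := by simp [harr1def]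
    refine ⟨by rw [(ih arr1).1, hlen1], ?_⟩
    intro hlt t
    have hmn : mN + 1 < arr.length := hlt
    have harr1 : ∀ s : Nat, arr1.getD s 0
        = if s = mN+1 then arr.getD mN 0 + arr.getD (mN+1) 0 else arr.getD s 0 := by
      intro s
      by_cases hs : s = mN+1
      · simp [harr1def, List.getD_eq_getElem?_getD, hs, hmn]
      · simp [harr1def, List.getD_eq_getElem?_getD, hs, Ne.symm hs]
    rw [(ih arr1).2 (by omega) t, harr1, harr1]
    by_cases ht : t = mN+1
    · subst ht
      simp
    · by_cases h1 : 1 ≤ t ∧ t ≤ mN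
      · simp [h1, show 1 ≤ t ∧ t ≤ mN+1 from by omega, show t - 1 ≠ mN+1 from by omega, ht]
      · simp [h1, ht, show ¬ (1 ≤ t ∧ t ≤ mN+1) from by omega]

lemma pvListExt (l1 l2 : List Int) (hlen : l1.length = l2.length)
    (h : ∀ t, l1.getD t 0 = l2.getD t 0) : l1 = l2 := by
  apply List.ext_getElem hlen
  intro t h1 h2
  have := h t
  simpa [List.getD_eq_getElem?_getD, List.getElem?_eq_getElem, h1, h2] using this

lemma pvRow_zero (m : Nat) : pvRow 0 m = 1 :: List.replicate m 0 := by
  simp [pvRow, List.range_succ_eq_map, List.map_map, Function.comp_def]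

-- one outer iteration of paskal turns row i into row (i+1)
lemma pvPascStep (m i : Nat) (hi : i < m) :
    (PySem.List.pyRange ((i : Int) + 1) 0 (-1)).foldl pvPaskalUpdL (pvRow i m) = pvRow (i+1) m := by
  have hc : ((i : Int) + 1) = (((i+1 : Nat)) : Int) := by push_cast; ring
  rw [hc]
  obtain ⟨hlen, hpt⟩ := pvPascFold (i+1) (pvRow i m)
  apply pvListExt _ _ (by rw [hlen, pvRow_length, pvRow_length])
  intro t
  rw [hpt (by rw [pvRow_length]; omega) t]
  by_cases htm : t < m + 1
  · rw [pvRow_getD _ _ _ htm]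
    by_cases h1 : 1 ≤ t ∧ t ≤ i+1
    · rw [if_pos h1, pvRow_getD _ _ _ (by omega), pvRow_getD _ _ _ (by omega)]
      rw [show t = t - 1 + 1 from by omega, Nat.choose_succ_succ]
      push_cast
      ring
    · rw [if_neg h1, pvRow_getD _ _ _ htm]
      rcases Nat.eq_zero_or_pos t with ht0 | htpos
      · subst ht0; simp
      · have : i < t := by omega
        rw [Nat.choose_eq_zero_of_lt this, Nat.choose_eq_zero_of_lt (by omega)]
  · have h2 : (pvRow i m).getD t 0 = 0 :=
      List.getD_eq_default _ _ (by rw [pvRow_length]; omega)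
    have h3 : (pvRow (i+1) m).getD t 0 = 0 :=
      List.getD_eq_default _ _ (by rw [pvRow_length]; omega)
    rw [if_neg (by omega), h2, h3]

-- paskal computes the row of binomials
lemma paskal_eq (m : Nat) : paskal (m : Int) = pvRow m m := by
  have h0 : (((m : Int) + 1)).toNat = m + 1 := by omega
  have hinit : PySem.List.pySetD (List.replicate (((m : Int) + 1)).toNat (0 : Int)) 0 1
      = pvRow 0 m := by
    rw [h0, pvRow_zero, List.replicate_succ]
    simp [PySem.List.pySetD, PySem.List.pySet?, PySem.List.pyIdx?]
  have key : paskal (m : Int)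
      = (PySem.List.pyRange 0 (m : Int) 1).foldl
          (fun arr i => (PySem.List.pyRange (i + 1) 0 (-1)).foldl pvPaskalUpdL arr)
          (PySem.List.pySetD (List.replicate (((m : Int) + 1)).toNat (0 : Int)) 0 1) := by
    show ((PySem.List.pyRange 0 (m : Int) 1).foldl
        (fun arr i => (PySem.List.pyRange (i + 1) 0 (-1)).foldl pvPaskalUpd arr)
        (pvASet (Array.replicate (((m : Int) + 1)).toNat (0 : Int)) 0 1)).toList = _
    rw [pvPaskalOuter_bridge, pvASet_toList _ _ _ (by omega)]
    simp
  rw [key, hinit]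
  have main : ∀ i : Nat, i ≤ m →
      (PySem.List.pyRange 0 (i : Int) 1).foldl
        (fun arr i => (PySem.List.pyRange (i + 1) 0 (-1)).foldl pvPaskalUpdL arr) (pvRow 0 m)
      = pvRow i m := by
    intro i hi
    induction i with
    | zero => rw [show ((0:Nat):Int) = 0 from rfl, PySem.List.pyRange_one_eq_nil (by omega)]; rfl
    | succ i ih =>
      have hc : (((i+1 : Nat)) : Int) = ((i : Int)) + 1 := by push_cast; ring
      rw [hc, PySem.List.pyRange_one_succ_right (by omega), List.foldl_append, ih (by omega)]
      simpa using pvPascStep m i (by omega)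
  exact main m le_rfl

-- partial sums with a guard skipping index 0
def pvSumA (g : Nat → Int) : Nat → Int
  | 0 => 0
  | j + 1 => pvSumA g j + (if 1 ≤ j then g j else 0)

lemma pvSumA_congr (g g' : Nat → Int) (j : Nat) (h : ∀ k, k < j → g k = g' k) :
    pvSumA g j = pvSumA g' j := by
  induction j with
  | zero => rfl
  | succ j ih => simp [pvSumA, ih (fun k hk => h k (by omega)), h j (by omega)]

-- A's outer loop invariant
lemma pvOuterA (arr : List Int) (c : Int) (j : Nat) (hj : j < arr.length) :
    (((PySem.List.pyRange 1 (j : Int) 1).foldl pvStepA (arr, c)).1.length = arr.length) ∧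
    (∀ t : Nat, j ≤ t →
      ((PySem.List.pyRange 1 (j : Int) 1).foldl pvStepA (arr, c)).1.getD t 0 = arr.getD t 0) ∧
    ((PySem.List.pyRange 1 (j : Int) 1).foldl pvStepA (arr, c)).2
      = c + pvSumA (fun k => pvCoinAdd (arr.getD k 0) pvCoins) j := by
  induction j with
  | zero =>
    rw [show ((0:Nat):Int) = 0 from rfl, PySem.List.pyRange_one_eq_nil (by omega)]
    exact ⟨rfl, fun t _ => rfl, by simp [pvSumA]⟩
  | succ j ih =>
    rcases Nat.eq_zero_or_pos j with hj0 | hjpos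
    · subst hj0
      rw [show ((1:Nat):Int) = 1 from rfl, PySem.List.pyRange_one_eq_nil (by omega)]
      exact ⟨rfl, fun t _ => rfl, by simp [pvSumA]⟩
    · obtain ⟨ihlen, ihpt, ihcnt⟩ := ih (by omega)
      have hc : (((j+1 : Nat)) : Int) = ((j : Int)) + 1 := by push_cast; ring
      rw [hc, PySem.List.pyRange_one_succ_right (by exact_mod_cast hjpos), List.foldl_append,
        List.foldl_cons, List.foldl_nil]
      set r := (PySem.List.pyRange 1 (j : Int) 1).foldl pvStepA (arr, c) with hr
      have hjlen : j < r.1.length := by omega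
      have hstep : pvStepA r ((j : Nat) : Int)
          = (r.1.set j (pvModChain (r.1.getD j 0) pvCoins),
             r.2 + pvCoinAdd (r.1.getD j 0) pvCoins) := by
        rw [show r = (r.1, r.2) from rfl, pvStepA_coins]
        simp only [PySem.List.pySetD_natCast, PySem.List.pyGetD_natCast]
        exact pvStepA_point pvCoins r.1 r.2 j hjlen
      rw [hstep]
      have hgj : r.1.getD j 0 = arr.getD j 0 := ihpt j le_rfl
      refine ⟨by simpa using ihlen, ?_, ?_⟩
      · intro t ht
        have : r.1.getD t 0 = arr.getD t 0 := ihpt t (by omega)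
        simp only []
        rw [← this]
        simp [List.getD_eq_getElem?_getD, show j ≠ t from by omega]
      · simp only []
        rw [ihcnt, hgj, pvSumA, if_pos (show 1 ≤ j from hjpos)]
        ring

-- exact division step of B: C(m,j-1)*(m-j+1) // j = C(m,j)
lemma pvChooseStep (m j : Nat) (h1 : 1 ≤ j) (hj : j ≤ m) :
    PySem.Int.floordiv ((m.choose (j-1) : Int) * ((m : Int) - (j : Int) + 1)) (j : Int)
      = (m.choose j : Int) := by
  have key : m.choose j * j = m.choose (j-1) * (m - (j-1)) := by
    have := Nat.choose_succ_right_eq m (j-1)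
    rwa [Nat.sub_add_cancel h1] at this
  have hcast : ((m : Int) - (j : Int) + 1) = ((m - (j-1) : Nat) : Int) := by
    have : j - 1 ≤ m := by omega
    push_cast [this]
    omega
  rw [hcast, ← Int.natCast_mul, ← key, Int.natCast_mul,
    PySem.Int.floordiv_eq_ediv_of_pos (by exact_mod_cast h1)]
  exact Int.mul_ediv_cancel _ (by exact_mod_cast Nat.one_le_iff_ne_zero.mp h1)

-- B's loop invariant
lemma pvOuterB (m j : Nat) (hj : j ≤ m) :
    (PySem.List.pyRange 1 (j : Int) 1).foldl
        (fun (st : Int × Int) k =>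
          let c := PySem.Int.floordiv (st.1 * ((m : Int) - k + 1)) k
          (c, st.2 + coin_count c)) (1, 2)
      = ((m.choose (j-1) : Int), 2 + pvSumA (fun k => coin_count ((m.choose k : Nat) : Int)) j) := by
  induction j with
  | zero =>
    rw [show ((0:Nat):Int) = 0 from rfl, PySem.List.pyRange_one_eq_nil (by omega)]
    simp [pvSumA]
  | succ j ih =>
    rcases Nat.eq_zero_or_pos j with hj0 | hjpos
    · subst hj0
      rw [show ((1:Nat):Int) = 1 from rfl, PySem.List.pyRange_one_eq_nil (by omega)]
      simp [pvSumA]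
    · have hc : (((j+1 : Nat)) : Int) = ((j : Int)) + 1 := by push_cast; ring
      rw [hc, PySem.List.pyRange_one_succ_right (by exact_mod_cast hjpos), List.foldl_append,
        List.foldl_cons, List.foldl_nil, ih (by omega)]
      simp only []
      rw [pvChooseStep m j hjpos (by omega)]
      rw [pvSumA, if_pos (show 1 ≤ j from hjpos)]
      simp only [Nat.add_sub_cancel]
      rw [add_assoc]

lemma pvCheckOuter_bridge (rng : List Int) (h : ∀ x ∈ rng, 0 ≤ x) (st : Array Int × Int) :
    ((rng.foldl (fun st i =>
        (PySem.List.pyRange ((pvChecker.length : Int) - 1) (-1) (-1)).foldl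
          (fun st j => pvCheckStep st i j) st) st).1.toList,
     (rng.foldl (fun st i =>
        (PySem.List.pyRange ((pvChecker.length : Int) - 1) (-1) (-1)).foldl
          (fun st j => pvCheckStep st i j) st) st).2)
      = rng.foldl pvStepA (st.1.toList, st.2) := by
  induction rng generalizing st with
  | nil => rfl
  | cons x rng ih =>
    rw [List.foldl_cons, List.foldl_cons, ih (fun y hy => h y (by simp [hy])) _,
      pvCheckInner_bridge _ x (h x (by simp)) st]
    rfl

lemma check_eq_sum (m : Nat) :
    check (m : Int) = 2 + pvSumA (fun k => pvCoinAdd ((m.choose k : Nat) : Int) pvCoins) m := by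
  have key : check (m : Int)
      = ((PySem.List.pyRange 1 ((((paskal (m : Int)).toArray.size : Int)) - 1) 1).foldl
          (fun st i =>
            (PySem.List.pyRange ((pvChecker.length : Int) - 1) (-1) (-1)).foldl
              (fun st j => pvCheckStep st i j) st)
          ((paskal (m : Int)).toArray, 2)).2 := rfl
  have hb := congrArg Prod.snd
    (pvCheckOuter_bridge (PySem.List.pyRange 1 ((((paskal (m : Int)).toArray.size : Int)) - 1) 1)
      (fun y hy => by have := (PySem.List.mem_pyRange_one.mp hy).1; omega)
      ((paskal (m : Int)).toArray, 2))
  simp only [] at hb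
  rw [key, hb]
  rw [paskal_eq]
  simp only [List.size_toArray]
  have hlen : (((pvRow m m).length : Int) - 1) = ((m : Nat) : Int) := by
    rw [pvRow_length]; push_cast; ring
  rw [hlen, (pvOuterA (pvRow m m) 2 m (by rw [pvRow_length]; omega)).2.2]
  congr 1
  apply pvSumA_congr
  intro k hk
  rw [pvRow_getD m m k (by omega)]

lemma check_alt_eq_sum (m : Nat) :
    check_alt (m : Int) = 2 + pvSumA (fun k => coin_count ((m.choose k : Nat) : Int)) m := by
  unfold check_alt
  rw [pvOuterB m m le_rfl]

-- ===== VERDICT (by name: the statement is the Claim_ definition above) =====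
theorem check_spec : Claim_equal_check := by
  intro n _ hpre
  unfold Pre_check at hpre
  unfold Spec_check
  obtain ⟨m, rfl⟩ : ∃ m : Nat, n = (m : Int) := ⟨n.toNat, by omega⟩
  rw [check_eq_sum, check_alt_eq_sum,
    pvSumA_congr _ _ m (fun k _ => (coin_count_eq ((m.choose k : Nat) : Int)).symm)]
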